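-- pv_equiv track=rewrite | github.com/scottmaran/lux | collector/scripts/detect_forbidden.py | match_contains
-- ===== SOURCE A (Python) =====
-- def match_contains(value, options) -> tuple[bool, str | None]:
--     if not isinstance(value, str):
--         return False, None
--     for opt in options:
--         opt_str = str(opt)
--         if opt_str and opt_str in value:
--             return True, opt_str
--     return False, None
-- ===== SOURCE B (Python) =====
-- def match_contains(value, options):
--     if not isinstance(value, str):
--         return False, None
--     # Index every substring of value whose length occurs among the options,
--     # then each option is checked with one hash lookup instead of a substring scan.
--     lengths = set(len(str(o)) for o in options if str(o))
--     subs = set(value[i:i + L] for L in lengths for i in range(len(value) - L + 1))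
--     for opt in options:
--         opt_str = str(opt)
--         if opt_str and opt_str in subs:
--             return True, opt_str
--     return False, None
-- ===== Notes on version B (the rewrite author's own statement) =====
-- stated objective: alternative
-- what changed: B precomputes the set of all nonempty substrings of value once and replaces A's per-option substring scan by a single set-membership lookup per option.
import Mathlib
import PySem

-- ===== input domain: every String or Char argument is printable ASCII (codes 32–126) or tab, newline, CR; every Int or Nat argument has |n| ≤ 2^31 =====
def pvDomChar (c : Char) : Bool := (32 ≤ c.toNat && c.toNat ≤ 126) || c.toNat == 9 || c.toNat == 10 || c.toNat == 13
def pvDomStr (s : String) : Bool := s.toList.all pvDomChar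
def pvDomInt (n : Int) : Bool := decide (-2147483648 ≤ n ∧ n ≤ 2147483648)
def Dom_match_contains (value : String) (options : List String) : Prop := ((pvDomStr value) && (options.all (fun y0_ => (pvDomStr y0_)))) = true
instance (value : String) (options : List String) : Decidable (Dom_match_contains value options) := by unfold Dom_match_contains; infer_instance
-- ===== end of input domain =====

-- B replaces A's per-option substring scan by one precomputed set of all
-- nonempty substrings of value, checked by set membership (alternative algorithm).

-- ===== PORT A =====
-- for opt in options: if opt and opt in value: return True, opt  — structural recursion over options
def match_contains (value : String) (options : List String) : Bool × Option String :=
  match options with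
  | [] => (false, none)
  | opt :: rest =>
      if opt != "" && PySem.Str.isIn opt value then (true, some opt)
      else match_contains value rest

-- ===== PORT B =====
-- lengths = set(len(str(o)) for o in options if str(o))
def pvLens (options : List String) : PySem.Set Int :=
  PySem.Set.ofList ((options.filter (fun o => o != "")).map (fun o => (o.toList.length : Int)))

-- subs = set(value[i:i+L] for L in lengths for i in range(len(value) - L + 1))
def pvSubs (l : List Char) (lens : PySem.Set Int) : PySem.Set (List Char) :=
  PySem.Set.ofList (lens.flatMap (fun L =>
    (PySem.List.pyRange 0 ((l.length : Int) - L + 1) 1).map (fun i =>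
      PySem.List.slice l (some i) (some (i + L)))))

def pvAltLoop (subs : PySem.Set (List Char)) (options : List String) : Bool × Option String :=
  match options with
  | [] => (false, none)
  | opt :: rest =>
      if opt != "" && PySem.Set.contains subs opt.toList then (true, some opt)
      else pvAltLoop subs rest

def match_contains_alt (value : String) (options : List String) : Bool × Option String :=
  pvAltLoop (pvSubs value.toList (pvLens options)) options

-- ===== PRECONDITION & SPEC =====
def Spec_match_contains (value : String) (options : List String) (out : Bool × Option String) : Prop := out = match_contains_alt value options
instance (value : String) (options : List String) (out : Bool × Option String) : Decidable (Spec_match_contains value options out) := by unfold Spec_match_contains; infer_instance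

-- ===== CLAIM (what is proved, stated in full; the proofs are below) =====
def Claim_equal_match_contains : Prop := ∀ (value : String) (options : List String), Dom_match_contains value options → Spec_match_contains value options (match_contains value options)

-- ===== LEMMAS AND PROOFS =====

theorem pvLens_pos (options : List String) : ∀ L ∈ pvLens options, 1 ≤ L := by
  intro L hL
  unfold pvLens at hL
  rw [PySem.Set.mem_ofList, List.mem_map] at hL
  obtain ⟨o, ho, rfl⟩ := hL
  rw [List.mem_filter] at ho
  have : o.toList ≠ [] := by
    intro hl
    have : o = "" := by rw [← String.ofList_toList (s := o), hl]
    simp [this] at ho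
  have : 1 ≤ o.toList.length := List.length_pos_of_ne_nil this
  omega

theorem mem_pvLens (options : List String) (opt : String) (hmem : opt ∈ options)
    (hne : opt ≠ "") : ((opt.toList.length : Int)) ∈ pvLens options := by
  unfold pvLens
  rw [PySem.Set.mem_ofList, List.mem_map]
  exact ⟨opt, List.mem_filter.2 ⟨hmem, by simp [hne]⟩, rfl⟩

-- membership in the substring index: exactly the infixes whose length is indexed
theorem mem_pvSubs_iff (l : List Char) (lens : PySem.Set Int)
    (hpos : ∀ L ∈ lens, 1 ≤ L) (c : List Char) :
    c ∈ pvSubs l lens ↔ ((c.length : Int)) ∈ lens ∧ c <:+: l := by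
  unfold pvSubs
  rw [PySem.Set.mem_ofList, List.mem_flatMap]
  constructor
  · rintro ⟨L, hL, hc⟩
    rw [List.mem_map] at hc
    obtain ⟨i, hi, rfl⟩ := hc
    rw [PySem.List.mem_pyRange_one] at hi
    obtain ⟨hi0, hin⟩ := hi
    have hL1 : 1 ≤ L := hpos L hL
    have hieq : i = ((i.toNat : Nat) : Int) := by omega
    have hLeq : ((i.toNat : Nat) : Int) + L = ((i.toNat + L.toNat : Nat) : Int) := by omega
    rw [hieq, hLeq, PySem.List.slice_natCast]
    have hlen : ((l.drop i.toNat).take (i.toNat + L.toNat - i.toNat)).length = L.toNat := by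
      rw [List.length_take, List.length_drop]; omega
    constructor
    · rw [hlen]
      have : ((L.toNat : Nat) : Int) = L := by omega
      rw [this]; exact hL
    · exact ((List.take_prefix _ _).isInfix).trans ((List.drop_suffix _ _).isInfix)
  · rintro ⟨hL, s, t, rfl⟩
    have hc1 : 1 ≤ c.length := by
      have := hpos _ hL; omega
    refine ⟨(c.length : Int), hL, ?_⟩
    rw [List.mem_map]
    refine ⟨(s.length : Int), ?_, ?_⟩
    · rw [PySem.List.mem_pyRange_one]
      constructor
      · exact Int.natCast_nonneg _
      · simp [List.length_append]
        omega
    · rw [PySem.List.slice_natCast_add]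
      rw [List.append_assoc, List.drop_left, List.take_left]

-- the two loop tests agree for every option drawn from the list
theorem cond_eq (value opt : String) (options : List String) (hmem : opt ∈ options) :
    (opt != "" && PySem.Set.contains (pvSubs value.toList (pvLens options)) opt.toList)
      = (opt != "" && PySem.Str.isIn opt value) := by
  by_cases h : opt = ""
  · subst h; simp
  · have hne : (opt != "") = true := by simp [h]
    rw [hne]
    simp only [Bool.true_and]
    rw [Bool.eq_iff_iff, PySem.Set.contains_iff, PySem.Str.isIn_iff_infix,
      mem_pvSubs_iff _ _ (pvLens_pos options)]
    constructor
    · rintro ⟨_, h2⟩; exact h2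
    · intro h2; exact ⟨mem_pvLens options opt hmem h, h2⟩

theorem loops_eq (value : String) (big : List String) (options : List String)
    (hsub : ∀ o ∈ options, o ∈ big) :
    match_contains value options = pvAltLoop (pvSubs value.toList (pvLens big)) options := by
  induction options with
  | nil => rfl
  | cons opt rest ih =>
      rw [match_contains, pvAltLoop, cond_eq value opt big (hsub opt (by simp)),
        ih (fun o ho => hsub o (by simp [ho]))]

-- ===== VERDICT (by name: the statement is the Claim_ definition above) =====
theorem match_contains_spec : Claim_equal_match_contains := by
  intro value options _
  unfold Spec_match_contains match_contains_alt
  exact loops_eq value options options (fun _ h => h)
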